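-- pv_equiv track=rewrite | github.com/ClearAnatomics/ClearMap | ClearMap/gui/gui_utils_base.py | html_to_ansi
-- ===== SOURCE A (Python) =====
-- def html_to_ansi(msg: str) -> str:  #  WARNING: Will not work correctly with colours
--     codes_dict = {
--         '<nobr>': '',
--         '</nobr>': '',
--         '<br>': '\n',
--         '</em>': '\033[0m',
--         '<em>': '\033[3m'
--     }
--     for k, v in codes_dict.items():
--         msg = msg.replace(k, v)
--     return msg
-- ===== SOURCE B (Python) =====
-- def html_to_ansi(msg: str) -> str:  # same contract as A; return value only
--     # The two <nobr> deletions must stay sequential passes: their empty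
--     # replacements can splice surrounding text into a new tag, which A's later
--     # passes then see.  The three ANSI substitutions are done in ONE
--     # tokenizing left-to-right scan instead of three full-string passes.
--     msg = msg.replace('<nobr>', '').replace('</nobr>', '')
--     ansi = {'<br>': '\n', '</em>': '\033[0m', '<em>': '\033[3m'}
--     out = []
--     i = 0
--     n = len(msg)
--     while i < n:
--         for tag, code in ansi.items():
--             if msg.startswith(tag, i):
--                 out.append(code)
--                 i += len(tag)
--                 break
--         else:
--             out.append(msg[i])
--             i += 1
--     return ''.join(out)
-- ===== Notes on version B (the rewrite author's own statement) =====
-- stated objective: alternative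
-- what changed: The three ANSI tag substitutions (<br>, </em>, <em>) are performed in a single left-to-right tokenizing scan that emits the output once, instead of three sequential full-string replace passes; the two <nobr>/</nobr> deletions remain sequential replaces because their empty replacements can splice surrounding text into a new tag that A's later passes rewrite.
import Mathlib
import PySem

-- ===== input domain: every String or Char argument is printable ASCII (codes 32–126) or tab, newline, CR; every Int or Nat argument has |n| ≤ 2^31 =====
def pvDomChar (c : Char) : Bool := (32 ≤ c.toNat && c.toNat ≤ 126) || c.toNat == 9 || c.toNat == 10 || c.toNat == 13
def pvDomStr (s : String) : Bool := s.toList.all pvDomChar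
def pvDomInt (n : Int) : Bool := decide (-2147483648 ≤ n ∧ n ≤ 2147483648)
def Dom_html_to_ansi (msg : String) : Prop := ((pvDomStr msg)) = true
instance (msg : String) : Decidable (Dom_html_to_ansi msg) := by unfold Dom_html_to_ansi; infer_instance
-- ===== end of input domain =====

-- B replaces the three ANSI substitution passes (<br>, </em>, <em>) by one
-- left-to-right tokenizing scan; the two <nobr>/</nobr> deletions stay as
-- sequential replaces because their empty replacements can splice text into
-- new tags that A's later passes rewrite.

-- ===== PORT A =====
def html_to_ansi (msg : String) : String :=
  let codes_dict : PySem.Dict String String :=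
    PySem.Dict.ofList [("<nobr>", ""), ("</nobr>", ""), ("<br>", "\n"),
                       ("</em>", "\x1b[0m"), ("<em>", "\x1b[3m")]
  codes_dict.items.foldl (fun m kv => PySem.Str.replace m kv.1 kv.2) msg

-- ===== PORT B =====
-- the tokenizing while-loop of Source B: at each position try the three tags in
-- dict order (msg.startswith(tag, i) ≙ isPrefixOf on the remaining suffix),
-- emit the code and skip the tag on a match, else copy one character.
def scanAnsi : List Char → List Char
  | [] => []
  | c :: t =>
    if ['<', 'b', 'r', '>'].isPrefixOf (c :: t) then
      '\n' :: scanAnsi (t.drop 3)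
    else if ['<', '/', 'e', 'm', '>'].isPrefixOf (c :: t) then
      '\x1b' :: '[' :: '0' :: 'm' :: scanAnsi (t.drop 4)
    else if ['<', 'e', 'm', '>'].isPrefixOf (c :: t) then
      '\x1b' :: '[' :: '3' :: 'm' :: scanAnsi (t.drop 3)
    else
      c :: scanAnsi t
  termination_by l => l.length
  decreasing_by all_goals (simp; try omega)

def html_to_ansi_alt (msg : String) : String :=
  let stripped := PySem.Str.replace (PySem.Str.replace msg "<nobr>" "") "</nobr>" ""
  String.ofList (scanAnsi stripped.toList)

-- ===== PRECONDITION & SPEC =====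
def Spec_html_to_ansi (msg : String) (out : String) : Prop := out = html_to_ansi_alt msg
instance (msg : String) (out : String) : Decidable (Spec_html_to_ansi msg out) := by unfold Spec_html_to_ansi; infer_instance

-- ===== CLAIM (what is proved, stated in full; the proofs are below) =====
def Claim_equal_html_to_ansi : Prop := ∀ (msg : String), Dom_html_to_ansi msg → Spec_html_to_ansi msg (html_to_ansi msg)

-- ===== LEMMAS AND PROOFS =====

-- a simple structural version of Python's str.replace for a nonempty pattern o::os
def repl (o : Char) (os new : List Char) : List Char → List Char
  | [] => []
  | c :: t =>
    if (o :: os).isPrefixOf (c :: t) then new ++ repl o os new (t.drop os.length)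
    else c :: repl o os new t
  termination_by l => l.length
  decreasing_by all_goals (simp; try omega)

theorem repl_go (o : Char) (os new : List Char) :
    ∀ fuel l acc, l.length ≤ fuel →
      PySem.Chars.replace.go (o :: os) new fuel l acc = acc.reverse ++ repl o os new l := by
  intro fuel
  induction fuel with
  | zero =>
    intro l acc h
    have : l = [] := List.length_eq_zero_iff.mp (Nat.le_zero.mp h)
    subst this
    simp [PySem.Chars.replace.go, repl]
  | succ n ih =>
    intro l acc h
    match l with
    | [] => simp [PySem.Chars.replace.go, repl]
    | c :: t =>
      rw [PySem.Chars.replace.go]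
      by_cases hp : (o :: os).isPrefixOf (c :: t) = true
      · rw [if_pos hp]
        have hd : List.drop (o :: os).length (c :: t) = t.drop os.length := by simp
        rw [hd, ih _ _ (by simp at h ⊢; omega)]
        rw [repl, if_pos hp]
        simp
      · rw [if_neg hp, ih _ _ (by simp at h; omega)]
        rw [repl, if_neg hp]
        simp

theorem replace_eq_repl (o : Char) (os new l : List Char) :
    PySem.Chars.replace l (o :: os) new = repl o os new l := by
  rw [PySem.Chars.replace]
  simp only [List.isEmpty_cons, Bool.false_eq_true, if_false]
  exact repl_go o os new l.length l [] (le_refl _)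

-- stepping over a non-matching position
theorem repl_step (o : Char) (os new : List Char) (c : Char) (t : List Char)
    (h : ¬ ((o :: os) <+: (c :: t))) :
    repl o os new (c :: t) = c :: repl o os new t := by
  rw [repl, if_neg (by simpa [List.isPrefixOf_iff_prefix] using h)]

-- a match at the head: repl over pattern ++ rest
theorem repl_hit (o : Char) (os new : List Char) (rest : List Char) :
    repl o os new (o :: (os ++ rest)) = new ++ repl o os new rest := by
  rw [repl, if_pos (by rw [List.isPrefixOf_iff_prefix]; exact ⟨rest, rfl⟩)]
  simp

-- if no char of p equals the head of `new`, a prefix p of the output was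
-- already a prefix of the input (every replacement chunk starts with new's head)
theorem prefix_repl (o : Char) (os : List Char) (h : Char) (nw : List Char) :
    ∀ (p X : List Char), h ∉ p →
      p <+: repl o os (h :: nw) X → p <+: X := by
  intro p
  induction p with
  | nil => intro X _ _; exact List.nil_prefix
  | cons a p' ih =>
    intro X hmem hpre
    match X with
    | [] =>
      rw [repl] at hpre
      exact absurd (List.prefix_nil.mp hpre) (by simp)
    | c :: t =>
      by_cases hp : (o :: os) <+: (c :: t)
      · rw [repl, if_pos (by simpa [List.isPrefixOf_iff_prefix] using hp)] at hpre
        rw [show ((h :: nw) ++ repl o os (h :: nw) (t.drop os.length))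
              = h :: (nw ++ repl o os (h :: nw) (t.drop os.length)) from rfl,
            List.cons_prefix_cons] at hpre
        simp at hmem
        exact absurd hpre.1.symm hmem.1
      · rw [repl_step o os _ c t hp, List.cons_prefix_cons] at hpre
        simp at hmem
        exact List.cons_prefix_cons.mpr ⟨hpre.1, ih t hmem.2 hpre.2⟩

-- the three passes, named for readability of the fusion proof
def rBr (l : List Char) : List Char := repl '<' ['b', 'r', '>'] ['\n'] l
def rCem (l : List Char) : List Char := repl '<' ['/', 'e', 'm', '>'] ['\x1b', '[', '0', 'm'] l
def rEm (l : List Char) : List Char := repl '<' ['e', 'm', '>'] ['\x1b', '[', '3', 'm'] l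

theorem rBr_step (c : Char) (t : List Char)
    (h : ¬ ((['<', 'b', 'r', '>'] : List Char) <+: (c :: t))) :
    rBr (c :: t) = c :: rBr t := repl_step _ _ _ _ _ h

theorem rCem_step (c : Char) (t : List Char)
    (h : ¬ ((['<', '/', 'e', 'm', '>'] : List Char) <+: (c :: t))) :
    rCem (c :: t) = c :: rCem t := repl_step _ _ _ _ _ h

theorem rEm_step (c : Char) (t : List Char)
    (h : ¬ ((['<', 'e', 'm', '>'] : List Char) <+: (c :: t))) :
    rEm (c :: t) = c :: rEm t := repl_step _ _ _ _ _ h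

-- the main fusion lemma: the three sequential passes equal the single scan
theorem three_passes_eq_scan : ∀ l : List Char, rEm (rCem (rBr l)) = scanAnsi l := by
  intro l
  induction hn : l.length using Nat.strong_induction_on generalizing l with
  | _ n ih =>
  subst hn
  match l with
  | [] => simp [rBr, rCem, rEm, repl, scanAnsi]
  | c :: t =>
    by_cases hbr : (['<', 'b', 'r', '>'] : List Char) <+: (c :: t)
    · -- "<br>" matches
      obtain ⟨rest, hrest⟩ := hbr
      have hct : c = '<' ∧ t = 'b' :: 'r' :: '>' :: rest := by
        have := hrest.symm; simp at this; exact ⟨this.1, this.2⟩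
      obtain ⟨hc, ht⟩ := hct
      subst hc; subst ht
      rw [scanAnsi, if_pos (by simp)]
      have h1 : rBr ('<' :: 'b' :: 'r' :: '>' :: rest) = '\n' :: rBr rest := by
        have := repl_hit '<' ['b', 'r', '>'] ['\n'] rest
        simpa [rBr] using this
      rw [h1,
          rCem_step '\n' _ (by simp),
          rEm_step '\n' _ (by simp)]
      have := ih rest.length (by simp only [List.length_cons]; omega) rest rfl
      simp [this]
    · by_cases hcem : (['<', '/', 'e', 'm', '>'] : List Char) <+: (c :: t)
      · -- "</em>" matches
        obtain ⟨rest, hrest⟩ := hcem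
        have hct : c = '<' ∧ t = '/' :: 'e' :: 'm' :: '>' :: rest := by
          have := hrest.symm; simp at this; exact ⟨this.1, this.2⟩
        obtain ⟨hc, ht⟩ := hct
        subst hc; subst ht
        rw [scanAnsi, if_neg (by simp [List.isPrefixOf_iff_prefix]),
            if_pos (by simp)]
        have h1 : rBr ('<' :: '/' :: 'e' :: 'm' :: '>' :: rest)
            = '<' :: '/' :: 'e' :: 'm' :: '>' :: rBr rest := by
          rw [rBr_step _ _ (by simp), rBr_step _ _ (by simp), rBr_step _ _ (by simp),
              rBr_step _ _ (by simp), rBr_step _ _ (by simp)]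
        have h2 : rCem ('<' :: '/' :: 'e' :: 'm' :: '>' :: rBr rest)
            = '\x1b' :: '[' :: '0' :: 'm' :: rCem (rBr rest) := by
          have := repl_hit '<' ['/', 'e', 'm', '>'] ['\x1b', '[', '0', 'm'] (rBr rest)
          simpa [rCem] using this
        rw [h1, h2,
            rEm_step '\x1b' _ (by simp), rEm_step '[' _ (by simp),
            rEm_step '0' _ (by simp), rEm_step 'm' _ (by simp)]
        have := ih rest.length (by simp only [List.length_cons]; omega) rest rfl
        simp [this]
      · by_cases hem : (['<', 'e', 'm', '>'] : List Char) <+: (c :: t)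
        · -- "<em>" matches
          obtain ⟨rest, hrest⟩ := hem
          have hct : c = '<' ∧ t = 'e' :: 'm' :: '>' :: rest := by
            have := hrest.symm; simp at this; exact ⟨this.1, this.2⟩
          obtain ⟨hc, ht⟩ := hct
          subst hc; subst ht
          rw [scanAnsi, if_neg (by simp [List.isPrefixOf_iff_prefix]),
              if_neg (by simp [List.isPrefixOf_iff_prefix]),
              if_pos (by simp)]
          have h1 : rBr ('<' :: 'e' :: 'm' :: '>' :: rest)
              = '<' :: 'e' :: 'm' :: '>' :: rBr rest := by
            rw [rBr_step _ _ (by simp), rBr_step _ _ (by simp),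
                rBr_step _ _ (by simp), rBr_step _ _ (by simp)]
          have h2 : rCem ('<' :: 'e' :: 'm' :: '>' :: rBr rest)
              = '<' :: 'e' :: 'm' :: '>' :: rCem (rBr rest) := by
            rw [rCem_step _ _ (by simp), rCem_step _ _ (by simp),
                rCem_step _ _ (by simp), rCem_step _ _ (by simp)]
          have h3 : rEm ('<' :: 'e' :: 'm' :: '>' :: rCem (rBr rest))
              = '\x1b' :: '[' :: '3' :: 'm' :: rEm (rCem (rBr rest)) := by
            have := repl_hit '<' ['e', 'm', '>'] ['\x1b', '[', '3', 'm'] (rCem (rBr rest))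
            simpa [rEm] using this
          rw [h1, h2, h3]
          have := ih rest.length (by simp only [List.length_cons]; omega) rest rfl
          simp [this]
        · -- no tag matches at the head: every pass copies c
          rw [scanAnsi, if_neg (by simpa [List.isPrefixOf_iff_prefix] using hbr),
              if_neg (by simpa [List.isPrefixOf_iff_prefix] using hcem),
              if_neg (by simpa [List.isPrefixOf_iff_prefix] using hem)]
          rw [rBr_step c t hbr]
          have hcem' : ¬ ((['<', '/', 'e', 'm', '>'] : List Char) <+: (c :: rBr t)) := by
            intro hpre
            rw [List.cons_prefix_cons] at hpre
            have htail : (['/', 'e', 'm', '>'] : List Char) <+: t :=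
              prefix_repl '<' ['b', 'r', '>'] '\n' [] ['/', 'e', 'm', '>'] t (by decide) hpre.2
            exact hcem (List.cons_prefix_cons.mpr ⟨hpre.1, htail⟩)
          rw [rCem_step c _ hcem']
          have hem' : ¬ ((['<', 'e', 'm', '>'] : List Char) <+: (c :: rCem (rBr t))) := by
            intro hpre
            rw [List.cons_prefix_cons] at hpre
            have h1 : (['e', 'm', '>'] : List Char) <+: rBr t :=
              prefix_repl '<' ['/', 'e', 'm', '>'] '\x1b' ['[', '0', 'm'] ['e', 'm', '>'] (rBr t)
                (by decide) hpre.2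
            have h2 : (['e', 'm', '>'] : List Char) <+: t :=
              prefix_repl '<' ['b', 'r', '>'] '\n' [] ['e', 'm', '>'] t (by decide) h1
            exact hem (List.cons_prefix_cons.mpr ⟨hpre.1, h2⟩)
          rw [rEm_step c _ hem']
          have := ih t.length (by simp only [List.length_cons]; omega) t rfl
          simp [this]

-- ===== VERDICT (by name: the statement is the Claim_ definition above) =====
theorem html_to_ansi_spec : Claim_equal_html_to_ansi := by
  intro msg _
  unfold Spec_html_to_ansi
  apply String.toList_inj.mp
  show (html_to_ansi msg).toList = (html_to_ansi_alt msg).toList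
  have hA : html_to_ansi msg =
      PySem.Str.replace (PySem.Str.replace (PySem.Str.replace (PySem.Str.replace
        (PySem.Str.replace msg "<nobr>" "") "</nobr>" "") "<br>" "\n") "</em>" "\x1b[0m")
        "<em>" "\x1b[3m" := rfl
  rw [hA]
  unfold html_to_ansi_alt
  simp only [PySem.Str.toList_replace]
  rw [show ("<br>" : String).toList = ['<', 'b', 'r', '>'] from rfl,
      show ("</em>" : String).toList = ['<', '/', 'e', 'm', '>'] from rfl,
      show ("<em>" : String).toList = ['<', 'e', 'm', '>'] from rfl,
      show ("\n" : String).toList = ['\n'] from rfl,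
      show ("\x1b[0m" : String).toList = ['\x1b', '[', '0', 'm'] from rfl,
      show ("\x1b[3m" : String).toList = ['\x1b', '[', '3', 'm'] from rfl]
  rw [replace_eq_repl, replace_eq_repl, replace_eq_repl]
  have := three_passes_eq_scan
    (PySem.Chars.replace (PySem.Chars.replace msg.toList ("<nobr>" : String).toList
      ("" : String).toList) ("</nobr>" : String).toList ("" : String).toList)
  simp only [rBr, rCem, rEm] at this
  rw [this]
  simp
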